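-- pv_equiv track=rewrite | github.com/iseppi/cloudflare-pyworker-dyndns2 | src/main.py | _get_zone_candidates
-- ===== SOURCE A (Python) =====
-- def _get_zone_candidates(fqdn):
--     """Generate zone name candidates for an FQDN using the algorithm in SPEC.md 6.1.
--
--     For 2 labels or fewer, try the full hostname directly.
--     For 3+ labels, try removing the first label first (most common case),
--     then the full hostname, then remaining suffixes left to right.
--     """
--     labels = fqdn.split(".")
--     candidates = []
--
--     if len(labels) <= 2:
--         # e.g. "example.com" — just try it directly
--         candidates.append(fqdn)
--     else:
--         # e.g. "home.example.com" — try "example.com" first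
--         without_first = ".".join(labels[1:])
--         candidates.append(without_first)
--
--         # Then try the full FQDN
--         candidates.append(fqdn)
--
--         # Then iterate remaining suffixes, skipping the one we already tried
--         for i in range(2, len(labels) - 1):
--             suffix = ".".join(labels[i:])
--             if suffix != without_first:
--                 candidates.append(suffix)
--
--     return candidates
-- ===== SOURCE B (Python) =====
-- def _get_zone_candidates(fqdn):
--     """Generate zone name candidates for an FQDN (SPEC.md 6.1 order).
--
--     Builds the label-suffixes incrementally from the right with string
--     concatenation instead of re-joining a slice for every start index,
--     then emits them in the spec order: (n-1)-label suffix, full FQDN,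
--     remaining suffixes by descending label count.
--     """
--     labels = fqdn.split(".")
--     n = len(labels)
--     if n <= 2:
--         return [fqdn]
--     suffix = labels[-1]
--     asc = []  # suffixes by ascending label count: 2 labels ... n-1 labels
--     for i in range(n - 2, 0, -1):
--         suffix = labels[i] + "." + suffix
--         asc.append(suffix)
--     return [asc[-1], fqdn] + list(reversed(asc[:-1]))
-- ===== Notes on version B (the rewrite author's own statement) =====
-- stated objective: alternative
-- what changed: Instead of re-joining a slice labels[i:] for every start index (with a redundant inequality guard), B builds each suffix from the right by one string concatenation from the previous suffix, collects them in ascending label count, and emits them in the spec order.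
import Mathlib
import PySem

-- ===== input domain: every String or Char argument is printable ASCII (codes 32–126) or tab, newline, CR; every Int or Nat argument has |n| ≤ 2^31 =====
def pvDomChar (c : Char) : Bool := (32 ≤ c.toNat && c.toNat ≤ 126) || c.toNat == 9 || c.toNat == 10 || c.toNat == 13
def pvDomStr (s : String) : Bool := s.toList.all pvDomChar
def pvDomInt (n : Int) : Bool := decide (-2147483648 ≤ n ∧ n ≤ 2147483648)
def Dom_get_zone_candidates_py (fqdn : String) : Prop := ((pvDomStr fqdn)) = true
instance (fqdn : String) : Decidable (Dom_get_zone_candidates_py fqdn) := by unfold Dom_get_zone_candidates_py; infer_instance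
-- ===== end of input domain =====

-- B replaces A's per-index re-join of labels[i:] (with a redundant guard) by building each
-- suffix from the right with one concatenation, then emitting them in the spec order (alternative decomposition).

-- ===== PORT A =====
def get_zone_candidates_py (fqdn : String) : List String :=
  -- labels = fqdn.split(".")  (separator "." is nonempty, so split? is always `some`)
  let labels : List String := (PySem.Str.split? fqdn ".").getD []
  if (labels.length : Int) ≤ 2 then
    [fqdn]
  else
    let without_first := PySem.Str.join "." (PySem.List.slice labels (some 1) none)
    let candidates : List String := [without_first, fqdn]
    (PySem.List.pyRange 2 ((labels.length : Int) - 1) 1).foldl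
      (fun acc i =>
        let suffix := PySem.Str.join "." (PySem.List.slice labels (some i) none)
        if suffix ≠ without_first then acc ++ [suffix] else acc)
      candidates

-- ===== PORT B =====
def get_zone_candidates_py_alt (fqdn : String) : List String :=
  let labels : List String := (PySem.Str.split? fqdn ".").getD []
  let n : Int := labels.length
  if n ≤ 2 then
    [fqdn]
  else
    -- labels[-1] and, below, labels[i] for i in range(n-2, 0, -1) are always in range
    -- in this branch (n ≥ 3), so pyGetD with default "" is exact here
    let p := (PySem.List.pyRange (n - 2) 0 (-1)).foldl
      (fun (st : String × List String) i =>
        let s := PySem.List.pyGetD labels i "" ++ "." ++ st.1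
        (s, st.2 ++ [s]))
      (PySem.List.pyGetD labels (-1) "", [])
    -- asc[-1] is in range (asc nonempty since n ≥ 3); asc[:-1] reversed
    [PySem.List.pyGetD p.2 (-1) "", fqdn] ++ (PySem.List.slice p.2 none (some (-1))).reverse

-- ===== PRECONDITION & SPEC =====
def Spec_get_zone_candidates_py (fqdn : String) (out : List String) : Prop := out = get_zone_candidates_py_alt fqdn
instance (fqdn : String) (out : List String) : Decidable (Spec_get_zone_candidates_py fqdn out) := by unfold Spec_get_zone_candidates_py; infer_instance

-- ===== CLAIM (what is proved, stated in full; the proofs are below) =====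
def Claim_equal_get_zone_candidates_py : Prop := ∀ (fqdn : String), Dom_get_zone_candidates_py fqdn → Spec_get_zone_candidates_py fqdn (get_zone_candidates_py fqdn)

-- ===== LEMMAS AND PROOFS =====

-- join "." over a list with ≥ 2 elements peels off the head with one "." separator
lemma joinS_cons_cons (p q : String) (rest : List String) :
    PySem.Str.join "." (p :: q :: rest) = p ++ "." ++ PySem.Str.join "." (q :: rest) := by
  apply String.toList_inj.mp
  simp [PySem.Str.toList_join, PySem.Chars.join_cons_cons]

lemma joinS_singleton (p : String) : PySem.Str.join "." [p] = p := by
  apply String.toList_inj.mp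
  simp [PySem.Str.toList_join, PySem.Chars.join_singleton]

-- joining a longer suffix list gives a strictly longer string
lemma len_joinS_cons (p : String) (rest : List String) (h : rest ≠ []) :
    (PySem.Str.join "." rest).toList.length < (PySem.Str.join "." (p :: rest)).toList.length := by
  obtain ⟨q, rest', rfl⟩ := List.exists_cons_of_ne_nil h
  rw [joinS_cons_cons]
  have hto : (p ++ "." ++ PySem.Str.join "." (q :: rest')).toList
      = p.toList ++ '.' :: (PySem.Str.join "." (q :: rest')).toList := by simp
  rw [hto]
  simp only [List.length_append, List.length_cons]
  omega

lemma len_joinS_drop_succ_lt (ls : List String) (k : Nat) (hk : k + 1 < ls.length) :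
    (PySem.Str.join "." (ls.drop (k + 1))).toList.length
      < (PySem.Str.join "." (ls.drop k)).toList.length := by
  rw [List.drop_eq_getElem_cons (show k < ls.length by omega)]
  exact len_joinS_cons _ _ (by simp only [ne_eq, List.drop_eq_nil_iff]; omega)

lemma len_joinS_drop_lt (ls : List String) (i j : Nat) (hij : i < j) (hj : j < ls.length) :
    (PySem.Str.join "." (ls.drop j)).toList.length < (PySem.Str.join "." (ls.drop i)).toList.length := by
  induction j, hij using Nat.le_induction with
  | base => exact len_joinS_drop_succ_lt ls i hj
  | succ n hn ih =>
    exact lt_trans (len_joinS_drop_succ_lt ls n hj) (ih (by omega))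

lemma joinS_drop_ne (ls : List String) (i j : Nat) (hij : i < j) (hj : j < ls.length) :
    PySem.Str.join "." (ls.drop j) ≠ PySem.Str.join "." (ls.drop i) := by
  intro heq
  have h1 := len_joinS_drop_lt ls i j hij hj
  rw [heq] at h1
  exact lt_irrefl _ h1

-- join "." (drop k) peels the k-th label
lemma joinS_drop_peel (ls : List String) (k : Nat) (hk : k + 1 < ls.length) :
    PySem.Str.join "." (ls.drop k) = ls.getD k "" ++ "." ++ PySem.Str.join "." (ls.drop (k + 1)) := by
  have h1 : k < ls.length := by omega
  have h2 : ls.drop (k + 1) ≠ [] := by simp only [ne_eq, List.drop_eq_nil_iff]; omega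
  obtain ⟨q, rest, hqr⟩ := List.exists_cons_of_ne_nil h2
  rw [List.drop_eq_getElem_cons h1, hqr, joinS_cons_cons, ← hqr, List.getD_eq_getElem ls "" h1]

-- countdown range peels its first (largest) element
lemma pyRange_neg_one_cons (m : Nat) :
    PySem.List.pyRange ((m : Int) + 1) 0 (-1) = ((m : Int) + 1) :: PySem.List.pyRange (m : Int) 0 (-1) := by
  rw [PySem.List.pyRange_neg_one, PySem.List.pyRange_neg_one]
  rw [show (((m : Int) + 1) - 0).toNat = m + 1 from by omega]
  rw [show (((m : Int)) - 0).toNat = m from by omega]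
  rw [List.range_succ_eq_map, List.map_cons, List.map_map]
  congr 1
  apply List.map_congr_left
  intro k _
  simp only [Function.comp_apply, Nat.succ_eq_add_one]
  push_cast
  ring

-- B's loop invariant: starting from the (m+1)-suffix, running i = m, m-1, …, 1 ends with the
-- 1-suffix and collects the suffixes for start indices m, m-1, …, 1 in that order
lemma B_loop (ls : List String) (m : Nat) (hm : 1 ≤ m) (hlen : m + 1 < ls.length) (acc : List String) :
    (PySem.List.pyRange (m : Int) 0 (-1)).foldl
      (fun (st : String × List String) i =>
        (PySem.List.pyGetD ls i "" ++ "." ++ st.1,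
         st.2 ++ [PySem.List.pyGetD ls i "" ++ "." ++ st.1]))
      (PySem.Str.join "." (ls.drop (m + 1)), acc)
    = (PySem.Str.join "." (ls.drop 1),
       acc ++ (List.range m).map (fun k => PySem.Str.join "." (ls.drop (m - k)))) := by
  induction m, hm using Nat.le_induction generalizing acc with
  | base =>
    have h1 : PySem.List.pyRange ((1 : Nat) : Int) 0 (-1) = [1] := by decide
    rw [h1]
    simp only [List.foldl_cons, List.foldl_nil]
    have h2 : PySem.List.pyGetD ls (1 : Int) "" = ls.getD 1 "" := by
      rw [show (1 : Int) = ((1 : Nat) : Int) from rfl, PySem.List.pyGetD_natCast]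
    rw [h2, ← joinS_drop_peel ls 1 (by omega)]
    simp [List.range_one]
  | succ n hn ih =>
    rw [show (((n + 1 : Nat)) : Int) = (n : Int) + 1 from by push_cast; ring]
    rw [pyRange_neg_one_cons n]
    simp only [List.foldl_cons]
    have h2 : PySem.List.pyGetD ls ((n : Int) + 1) "" = ls.getD (n + 1) "" := by
      rw [show ((n : Int) + 1) = ((n + 1 : Nat) : Int) from by push_cast; ring, PySem.List.pyGetD_natCast]
    rw [h2, ← joinS_drop_peel ls (n + 1) (by omega)]
    rw [ih (by omega) (acc ++ [PySem.Str.join "." (ls.drop (n + 1))])]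
    rw [List.range_succ_eq_map, List.map_cons, List.map_map]
    refine Prod.ext rfl ?_
    simp only [List.append_assoc, List.singleton_append, Nat.sub_zero]
    apply congrArg (acc ++ ·)
    congr 1
    apply List.map_congr_left
    intro k _
    simp only [Function.comp_apply]
    rw [show n + 1 - (k + 1) = n - k from by omega]

-- A's else-branch in closed form (the guard is always true: a later suffix is strictly shorter)
lemma A_else (ls : List String) (fqdn : String) (h : 2 < ls.length) :
    (PySem.List.pyRange 2 ((ls.length : Int) - 1) 1).foldl
      (fun acc i =>
        if PySem.Str.join "." (PySem.List.slice ls (some i) none)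
            ≠ PySem.Str.join "." (PySem.List.slice ls (some 1) none)
        then acc ++ [PySem.Str.join "." (PySem.List.slice ls (some i) none)] else acc)
      [PySem.Str.join "." (PySem.List.slice ls (some 1) none), fqdn]
    = [PySem.Str.join "." (ls.drop 1), fqdn]
      ++ (List.range (ls.length - 3)).map (fun k => PySem.Str.join "." (ls.drop (2 + k))) := by
  have hw : PySem.List.slice ls (some 1) none = ls.drop 1 := by
    rw [PySem.List.slice_from ls (by norm_num : (0 : Int) ≤ 1)]
    norm_num
  rw [PySem.List.foldl_congr_mem _ _
      (fun (acc : List String) (i : Int) =>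
        acc ++ [PySem.Str.join "." (PySem.List.slice ls (some i) none)]) _
      (by
        intro acc i hi
        rw [PySem.List.mem_pyRange_one] at hi
        have h2 : PySem.List.slice ls (some i) none = ls.drop i.toNat :=
          PySem.List.slice_from ls (by omega : (0 : Int) ≤ i)
        rw [if_pos]
        rw [h2, hw]
        exact joinS_drop_ne ls 1 i.toNat (by omega) (by omega))]
  rw [PySem.List.foldl_append_singleton_eq_map, hw, PySem.List.pyRange_one, List.map_map]
  rw [show (((ls.length : Int) - 1) - 2).toNat = ls.length - 3 from by omega]
  congr 1
  apply List.map_congr_left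
  intro k _
  simp only [Function.comp_apply]
  rw [PySem.List.slice_from ls (by positivity : (0 : Int) ≤ 2 + (k : Int))]
  rw [show ((2 : Int) + (k : Int)).toNat = 2 + k from by omega]

lemma main_eq (fqdn : String) :
    get_zone_candidates_py fqdn = get_zone_candidates_py_alt fqdn := by
  simp only [get_zone_candidates_py, get_zone_candidates_py_alt]
  set ls : List String := (PySem.Str.split? fqdn ".").getD [] with hls
  by_cases h : (ls.length : Int) ≤ 2
  · rw [if_pos h, if_pos h]
  · rw [if_neg h, if_neg h]
    have hlen : 2 < ls.length := by omega
    have hne : ls ≠ [] := by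
      intro hnil; rw [hnil] at hlen; simp at hlen
    rw [A_else ls fqdn hlen]
    have hinit : PySem.List.pyGetD ls (-1) "" = PySem.Str.join "." (ls.drop (ls.length - 2 + 1)) := by
      rw [PySem.List.pyGetD_neg_one ls "" hne]
      rw [show ls.length - 2 + 1 = ls.length - 1 from by omega]
      have h2 : ls.drop (ls.length - 1) = [ls.getLast hne] := by
        rw [List.drop_eq_getElem_cons (show ls.length - 1 < ls.length by omega)]
        rw [show ls.length - 1 + 1 = ls.length from by omega, List.drop_length,
          List.getLast_eq_getElem]
      rw [h2, joinS_singleton]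
    rw [show ((ls.length : Int) - 2) = ((ls.length - 2 : Nat) : Int) from by omega]
    rw [hinit, B_loop ls (ls.length - 2) (by omega) (by omega) []]
    set m := ls.length - 2 with hm
    simp only [List.nil_append]
    have hasc_ne : ((List.range m).map (fun k => PySem.Str.join "." (ls.drop (m - k)))) ≠ [] := by
      simp only [ne_eq, List.map_eq_nil_iff, List.range_eq_nil]
      omega
    rw [PySem.List.pyGetD_neg_one _ "" hasc_ne]
    have hlast : ((List.range m).map (fun k => PySem.Str.join "." (ls.drop (m - k)))).getLast hasc_ne
        = PySem.Str.join "." (ls.drop 1) := by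
      rw [List.getLast_eq_getElem]
      simp only [List.getElem_map, List.getElem_range, List.length_map, List.length_range]
      rw [show m - (m - 1) = 1 from by omega]
    rw [hlast]
    have hr : List.range m = List.range (m - 1) ++ [m - 1] := by
      conv_lhs => rw [show m = (m - 1) + 1 from by omega]
      rw [List.range_succ]
    have hdl : PySem.List.slice
          ((List.range m).map (fun k => PySem.Str.join "." (ls.drop (m - k)))) none (some (-1))
        = (List.range (m - 1)).map (fun k => PySem.Str.join "." (ls.drop (m - k))) := by
      rw [PySem.List.slice_to_neg_one, hr, List.map_append]
      simp only [List.map_cons, List.map_nil]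
      rw [List.dropLast_concat]
    rw [hdl]
    have htail : ((List.range (m - 1)).map (fun k => PySem.Str.join "." (ls.drop (m - k)))).reverse
        = (List.range (ls.length - 3)).map (fun k => PySem.Str.join "." (ls.drop (2 + k))) := by
      rw [show ls.length - 3 = m - 1 from by omega]
      apply List.ext_getElem
      · simp
      · intro j h1 h2
        simp only [List.length_reverse, List.length_map, List.length_range] at h1 h2
        simp only [List.getElem_reverse, List.getElem_map, List.getElem_range, List.length_map,
          List.length_range]
        rw [show m - (m - 1 - 1 - j) = 2 + j from by omega]
    rw [htail]

-- ===== VERDICT (by name: the statement is the Claim_ definition above) =====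
theorem get_zone_candidates_py_spec : Claim_equal_get_zone_candidates_py := by
  intro fqdn _
  exact main_eq fqdn
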